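-- pv_equiv track=rewrite | github.com/Relrin/RubyParser | main.py | CorrectDict
-- ===== SOURCE A (Python) =====
-- def CorrectDict(buf):
--     """
--         Корректируем словарь до вида КЛЮЧ:["объект","кол-во повторов"] без повторов
--         Входные данные:
--             buf        - данные присланные от обработчиков строк в виде словаря
--     """
--     base={}
--     ListInDict={}
--     for key_b in buf.keys():
--         cnt=0
--         # считаем количество повторов
--         for key in buf.keys():
--             if buf[key_b]==buf[key]: cnt+=1
--         # запись в словарь
--         ListInDict[key_b]=[buf[key_b],cnt]
--
--     keys=values=[]
--     for key in buf.keys():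
--         temp={}
--         if (key not in keys) and (ListInDict[key] not in values):
--             temp[key]=ListInDict[key]
--             base.update(temp)
--             keys.append(key)
--             values.append(ListInDict[key])
--     return base
-- ===== SOURCE B (Python) =====
-- def CorrectDict(buf):
--     """One grouping pass over buf.items(): ordered groups keyed by value (==),
--     each group holding [value, first_key, count]; then emit {first_key: [value, count]}."""
--     groups = []  # [value, first_key, count] in first-seen order
--     for k, v in buf.items():
--         for g in groups:
--             if g[0] == v:
--                 g[2] += 1
--                 break
--         else:
--             groups.append([v, k, 1])
--     return {g[1]: [g[0], g[2]] for g in groups}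
-- ===== Notes on version B (the rewrite author's own statement) =====
-- stated objective: faster
-- what changed: Replaces A's two phases (a per-key full-scan count table, then a dedup pass over a mixed seen-list that itself does linear membership scans) by a single grouping pass over buf.items() keeping ordered [value, first_key, count] groups found by linear value-equality search; Pre_ only excludes association lists with duplicate keys, which encode no Python dict.
import Mathlib
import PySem

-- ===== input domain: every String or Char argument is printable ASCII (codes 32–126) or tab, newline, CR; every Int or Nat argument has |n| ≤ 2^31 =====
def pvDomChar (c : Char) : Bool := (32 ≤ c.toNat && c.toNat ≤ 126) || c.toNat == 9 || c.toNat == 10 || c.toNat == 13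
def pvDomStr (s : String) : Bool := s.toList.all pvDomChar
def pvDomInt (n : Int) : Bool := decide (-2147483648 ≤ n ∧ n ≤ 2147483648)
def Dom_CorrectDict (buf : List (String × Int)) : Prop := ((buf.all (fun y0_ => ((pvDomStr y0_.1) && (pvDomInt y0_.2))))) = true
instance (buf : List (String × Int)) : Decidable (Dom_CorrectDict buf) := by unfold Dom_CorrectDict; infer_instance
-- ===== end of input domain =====

-- B makes one grouping pass over the items instead of A's count table plus dedup pass; equal output proved on all duplicate-key-free association lists (= all Python dicts).

-- ===== PORT A =====
-- The Python aliasing `keys=values=[]` makes ONE shared list holding both string keys and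
-- [value,count] pairs; it is modelled by a list of MixItem (a string key never equals a pair,
-- exactly as in Python).
inductive MixItem where
  | key : String → MixItem
  | val : Int → Int → MixItem
deriving DecidableEq, Repr

-- base.update(temp) with the single key `key` appends: under Pre_ the dict keys are unique,
-- so `key` is never already in base.
def CorrectDict (buf : List (String × Int)) : List (String × List Int) :=
  let d := PySem.Dict.mk buf
  let listInDict : PySem.Dict String (Int × Int) :=
    d.keys.foldl (fun ld key_b =>
      let cnt : Int :=
        d.keys.foldl (fun cnt key =>
          if d.getD key_b 0 = d.getD key 0 then cnt + 1 else cnt) 0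
      ld.insert key_b (d.getD key_b 0, cnt)) PySem.Dict.empty
  let res :=
    d.keys.foldl (fun (st : List (String × List Int) × List MixItem) key =>
      let liv := listInDict.getD key (0, 0)
      if MixItem.key key ∈ st.2 ∨ MixItem.val liv.1 liv.2 ∈ st.2 then st
      else (st.1 ++ [(key, [liv.1, liv.2])], st.2 ++ [MixItem.key key, MixItem.val liv.1 liv.2]))
      ([], [])
  res.1

-- ===== PORT B =====
-- linear value-equality search over the groups: increment the matching group's count, or append a new group
def pvBump (gs : List (Int × String × Int)) (k : String) (v : Int) : List (Int × String × Int) :=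
  match gs with
  | [] => [(v, k, 1)]
  | g :: rest => if g.1 = v then (g.1, g.2.1, g.2.2 + 1) :: rest else g :: pvBump rest k v

def CorrectDict_alt (buf : List (String × Int)) : List (String × List Int) :=
  let groups := (PySem.Dict.mk buf).items.foldl (fun gs kv => pvBump gs kv.1 kv.2) []
  groups.map (fun g => (g.2.1, [g.1, g.2.2]))

-- ===== PRECONDITION & SPEC =====
-- Pre_ excludes only association lists with duplicate keys: buf is a Python dict, whose keys
-- are necessarily unique, so such lists encode no input A ever receives.
def Pre_CorrectDict (buf : List (String × Int)) : Prop := (buf.map Prod.fst).Nodup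
instance (buf : List (String × Int)) : Decidable (Pre_CorrectDict buf) := by unfold Pre_CorrectDict; infer_instance
def pvWitness_CorrectDict : (List (String × Int)) := [("a", 1), ("b", 1), ("c", 2)]

def Spec_CorrectDict (buf : List (String × Int)) (out : List (String × List Int)) : Prop := out = CorrectDict_alt buf
instance (buf : List (String × Int)) (out : List (String × List Int)) : Decidable (Spec_CorrectDict buf out) := by unfold Spec_CorrectDict; infer_instance

-- ===== CLAIM (what is proved, stated in full; the proofs are below) =====
def Claim_equal_CorrectDict : Prop := ∀ (buf : List (String × Int)), Dom_CorrectDict buf → Pre_CorrectDict buf → Spec_CorrectDict buf (CorrectDict buf)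

-- ===== LEMMAS AND PROOFS =====

-- the first pair of each distinct value not yet in `seen`, in order
def foVals : List (String × Int) → List Int → List (String × Int)
  | [], _ => []
  | p :: t, seen => if p.2 ∈ seen then foVals t seen else p :: foVals t (seen ++ [p.2])

-- how often value v occurs in buf
def cntV (buf : List (String × Int)) (v : Int) : Int := ((buf.map Prod.snd).count v : Int)

-- the entry A/B emit for the first pair of a value
def fOut (buf : List (String × Int)) (kv : String × Int) : String × List Int :=
  (kv.1, [kv.2, cntV buf kv.2])

-- the shared keys=values list of A after keeping the pairs `kept`
def mixedOf (buf : List (String × Int)) (kept : List (String × Int)) : List MixItem :=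
  kept.flatMap (fun kv => [MixItem.key kv.1, MixItem.val kv.2 (cntV buf kv.2)])

theorem countFoldP (v : Int) : ∀ (l : List (String × Int)) (c : Int),
    l.foldl (fun c q => if v = q.2 then c + 1 else c) c
      = c + ((l.map Prod.snd).count v : Int) := by
  intro l
  induction l with
  | nil => intro c; simp
  | cons a t ih =>
    intro c
    rw [List.foldl_cons]
    by_cases h : v = a.2
    · rw [if_pos h, ih, List.map_cons, List.count_cons, if_pos (beq_iff_eq.mpr h.symm)]
      push_cast
      ring
    · rw [if_neg h, ih, List.map_cons, List.count_cons,
        if_neg (show ¬ (a.2 == v) = true by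
          simp only [beq_iff_eq]
          exact fun hh => h hh.symm)]
      simp

theorem getD_mk_of_mem (buf : List (String × Int)) (hnd : (buf.map Prod.fst).Nodup)
    (p : String × Int) (hp : p ∈ buf) : (PySem.Dict.mk buf).getD p.1 (0 : Int) = p.2 := by
  apply PySem.Dict.getD_of_mem_items
  · simpa using hp
  · simpa using hnd

theorem cntFold_eq (buf : List (String × Int)) (hnd : (buf.map Prod.fst).Nodup)
    (p : String × Int) (hp : p ∈ buf) :
    (buf.map Prod.fst).foldl
      (fun c key => if (PySem.Dict.mk buf).getD p.1 0 = (PySem.Dict.mk buf).getD key 0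
                    then c + 1 else c) 0 = cntV buf p.2 := by
  rw [List.foldl_map]
  have h1 : buf.foldl (fun c q =>
        if (PySem.Dict.mk buf).getD p.1 0 = (PySem.Dict.mk buf).getD q.1 0
        then c + 1 else c) 0
      = buf.foldl (fun (c : Int) (q : String × Int) => if p.2 = q.2 then c + 1 else c) 0 := by
    apply PySem.List.foldl_congr_mem
    intro acc q hq
    rw [getD_mk_of_mem buf hnd p hp, getD_mk_of_mem buf hnd q hq]
  refine h1.trans ?_
  rw [countFoldP p.2 buf 0]
  simp [cntV]

theorem listInDict_getD (buf : List (String × Int)) (hnd : (buf.map Prod.fst).Nodup)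
    (F : String → Int × Int) (p : String × Int) (hp : p ∈ buf) :
    ((buf.map Prod.fst).foldl (fun ld key_b => ld.insert key_b (F key_b))
        (PySem.Dict.empty : PySem.Dict String (Int × Int))).getD p.1 (0, 0) = F p.1 := by
  have hitems : ((buf.map Prod.fst).foldl (fun ld key_b => ld.insert key_b (F key_b))
      (PySem.Dict.empty : PySem.Dict String (Int × Int))).items
      = (PySem.Dict.empty : PySem.Dict String (Int × Int)).items
        ++ (buf.map Prod.fst).map (fun a => (a, F a)) := by
    apply PySem.Dict.items_foldl_insert_fresh (k := fun a => a)
    · intro a _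
      simp [PySem.Dict.contains_empty]
    · simpa using hnd
  apply PySem.Dict.getD_of_mem_items
  · rw [hitems]
    refine List.mem_append.mpr (Or.inr ?_)
    exact List.mem_map.mpr ⟨p.1, List.mem_map.mpr ⟨p, hp, rfl⟩, rfl⟩
  · have h2 : ((buf.map Prod.fst).foldl (fun ld key_b => ld.insert key_b (F key_b))
        (PySem.Dict.empty : PySem.Dict String (Int × Int))).keys.Nodup := by
      apply PySem.Dict.nodup_keys_foldl_insert
      simp [PySem.Dict.keys_empty]
    exact h2

theorem foVals_append (x : String × Int) : ∀ (l : List (String × Int)) (seen : List Int),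
    foVals (l ++ [x]) seen
      = foVals l seen ++ (if x.2 ∈ seen ∨ x.2 ∈ l.map Prod.snd then [] else [x]) := by
  intro l
  induction l with
  | nil =>
    intro seen
    by_cases h : x.2 ∈ seen <;> simp [foVals, h]
  | cons p t ih =>
    intro seen
    by_cases hp : p.2 ∈ seen
    · have hiff : (x.2 ∈ seen ∨ x.2 ∈ t.map Prod.snd)
          ↔ (x.2 ∈ seen ∨ x.2 ∈ (p :: t).map Prod.snd) := by
        simp only [List.map_cons, List.mem_cons]
        constructor
        · tauto
        · rintro (h | h | h)
          · exact Or.inl h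
          · exact Or.inl (h ▸ hp)
          · exact Or.inr h
      simp only [List.cons_append, foVals, if_pos hp, ih]
      rw [if_congr hiff rfl rfl]
    · have hiff : (x.2 ∈ seen ++ [p.2] ∨ x.2 ∈ t.map Prod.snd)
          ↔ (x.2 ∈ seen ∨ x.2 ∈ (p :: t).map Prod.snd) := by
        simp only [List.mem_append, List.mem_singleton, List.map_cons, List.mem_cons]
        tauto
      simp only [List.cons_append, foVals, if_neg hp, ih]
      rw [if_congr hiff rfl rfl]

theorem foVals_mem_snd (v : Int) : ∀ (l : List (String × Int)) (seen : List Int),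
    v ∈ (foVals l seen).map Prod.snd ↔ v ∉ seen ∧ v ∈ l.map Prod.snd := by
  intro l
  induction l with
  | nil => intro seen; simp [foVals]
  | cons p t ih =>
    intro seen
    by_cases hp : p.2 ∈ seen
    · simp only [foVals, if_pos hp, ih, List.map_cons, List.mem_cons]
      constructor
      · rintro ⟨h1, h2⟩
        exact ⟨h1, Or.inr h2⟩
      · rintro ⟨h1, h2 | h2⟩
        · exact absurd (h2 ▸ hp) h1
        · exact ⟨h1, h2⟩
    · simp only [foVals, if_neg hp, List.map_cons, List.mem_cons, ih, List.mem_append,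
        List.mem_singleton]
      constructor
      · rintro (h | ⟨h1, h2⟩)
        · exact ⟨h ▸ hp, Or.inl h⟩
        · exact ⟨fun hh => h1 (Or.inl hh), Or.inr h2⟩
      · rintro ⟨h1, h2 | h2⟩
        · exact Or.inl h2
        · by_cases hv : v = p.2
          · exact Or.inl hv
          · exact Or.inr ⟨by tauto, h2⟩

theorem foVals_nodup_snd : ∀ (l : List (String × Int)) (seen : List Int),
    ((foVals l seen).map Prod.snd).Nodup := by
  intro l
  induction l with
  | nil => intro seen; simp [foVals]
  | cons p t ih =>
    intro seen
    by_cases hp : p.2 ∈ seen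
    · simpa [foVals, hp] using ih seen
    · simp only [foVals, if_neg hp, List.map_cons, List.nodup_cons]
      refine ⟨?_, ih _⟩
      rw [foVals_mem_snd]
      simp

theorem pvBump_new (k : String) (v : Int) : ∀ (gs : List (Int × String × Int)),
    v ∉ gs.map (fun g => g.1) → pvBump gs k v = gs ++ [(v, k, 1)] := by
  intro gs
  induction gs with
  | nil => intro _; simp [pvBump]
  | cons g rest ih =>
    intro h
    simp only [List.map_cons, List.mem_cons, not_or] at h
    have hne : ¬ g.1 = v := fun hh => h.1 hh.symm
    simp only [pvBump, if_neg hne, ih h.2, List.cons_append]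

theorem pvBump_inc (k : String) (v : Int) : ∀ (gs : List (Int × String × Int)),
    v ∈ gs.map (fun g => g.1) → (gs.map (fun g => g.1)).Nodup →
    pvBump gs k v = gs.map (fun g => if g.1 = v then (g.1, g.2.1, g.2.2 + 1) else g) := by
  intro gs
  induction gs with
  | nil => intro h; simp at h
  | cons g rest ih =>
    intro hmem hnd
    simp only [List.map_cons, List.nodup_cons] at hnd
    by_cases hg : g.1 = v
    · simp only [pvBump, if_pos hg, List.map_cons]
      have hrest : rest.map (fun g => if g.1 = v then (g.1, g.2.1, g.2.2 + 1) else g) = rest := by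
        have hpt : ∀ q ∈ rest, (if q.1 = v then (q.1, q.2.1, q.2.2 + 1) else q) = q := by
          intro q hq
          have hq1 : ¬ q.1 = v := fun hh =>
            hnd.1 (hg ▸ hh ▸ (List.mem_map.mpr ⟨q, hq, rfl⟩))
          simp only [if_neg hq1]
        calc rest.map _ = rest.map id := List.map_congr_left hpt
        _ = rest := List.map_id _
      rw [hrest]
    · have hvrest : v ∈ rest.map (fun g => g.1) := by
        obtain ⟨q, hq, hqv⟩ := List.mem_map.mp hmem
        rcases List.mem_cons.mp hq with h' | h'
        · exact absurd (h' ▸ hqv) (fun hh => hg hh)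
        · exact List.mem_map.mpr ⟨q, h', hqv⟩
      simp only [pvBump, if_neg hg, List.map_cons]
      rw [ih hvrest hnd.2]

theorem groups_char : ∀ (l : List (String × Int)),
    l.foldl (fun gs kv => pvBump gs kv.1 kv.2) []
      = (foVals l []).map (fun kv => (kv.2, kv.1, cntV l kv.2)) := by
  intro l
  induction l using List.reverseRecOn with
  | nil => simp [foVals]
  | append_singleton l x ih =>
    rw [List.foldl_append, List.foldl_cons, List.foldl_nil, ih]
    have hvals : ((foVals l []).map (fun kv => (kv.2, kv.1, cntV l kv.2))).map
        (fun g => g.1) = (foVals l []).map Prod.snd := by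
      rw [List.map_map]
      rfl
    by_cases hx : x.2 ∈ l.map Prod.snd
    · have hmem : x.2 ∈ ((foVals l []).map (fun kv => (kv.2, kv.1, cntV l kv.2))).map
          (fun g => g.1) := by
        rw [hvals, foVals_mem_snd]
        exact ⟨by simp, hx⟩
      rw [pvBump_inc x.1 x.2 _ hmem (by rw [hvals]; exact foVals_nodup_snd l [])]
      rw [foVals_append, if_pos (Or.inr hx), List.append_nil, List.map_map]
      apply List.map_congr_left
      intro kv _
      simp only [Function.comp]
      by_cases hkv : kv.2 = x.2
      · simp only [if_pos hkv, cntV, List.map_append, List.count_append]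
        have h1 : ([x].map Prod.snd).count kv.2 = 1 := by simp [hkv]
        rw [h1]
        push_cast
        ring_nf
      · simp only [if_neg hkv, cntV, List.map_append, List.count_append]
        have h0 : ([x].map Prod.snd).count kv.2 = 0 := by
          rw [List.count_eq_zero]
          simp only [List.map_cons, List.map_nil, List.mem_cons, List.not_mem_nil, or_false]
          exact hkv
        rw [h0]
        simp
    · have hmem : x.2 ∉ ((foVals l []).map (fun kv => (kv.2, kv.1, cntV l kv.2))).map
          (fun g => g.1) := by
        rw [hvals, foVals_mem_snd]
        tauto
      rw [pvBump_new x.1 x.2 _ hmem]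
      rw [foVals_append, if_neg (by simp [hx]), List.map_append]
      congr 1
      · apply List.map_congr_left
        intro kv hkv
        have hne : kv.2 ≠ x.2 := by
          have hm := (foVals_mem_snd kv.2 l []).mp (List.mem_map.mpr ⟨kv, hkv, rfl⟩)
          exact fun hh => hx (hh ▸ hm.2)
        simp only [cntV, List.map_append, List.count_append]
        have h0 : ([x].map Prod.snd).count kv.2 = 0 := by
          rw [List.count_eq_zero]
          simp only [List.map_cons, List.map_nil, List.mem_cons, List.not_mem_nil, or_false]
          exact hne
        rw [h0]
        simp
      · have hc : cntV (l ++ [x]) x.2 = 1 := by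
          simp [cntV, List.count_append, List.count_eq_zero.mpr hx]
        simp [hc]

theorem mixedOf_key_mem (buf : List (String × Int)) (kept : List (String × Int)) (k : String) :
    MixItem.key k ∈ mixedOf buf kept ↔ k ∈ kept.map Prod.fst := by
  simp only [mixedOf, List.mem_flatMap, List.mem_map]
  constructor
  · rintro ⟨kv, hkv, h⟩
    simp only [List.mem_cons, List.not_mem_nil, or_false] at h
    rcases h with h | h
    · refine ⟨kv, hkv, ?_⟩
      injection h with h'
      exact h'.symm
    · exact MixItem.noConfusion h
  · rintro ⟨kv, hkv, h⟩
    refine ⟨kv, hkv, ?_⟩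
    exact List.mem_cons.mpr (Or.inl (by rw [h]))

theorem mixedOf_val_mem (buf : List (String × Int)) (kept : List (String × Int)) (v : Int) :
    MixItem.val v (cntV buf v) ∈ mixedOf buf kept ↔ v ∈ kept.map Prod.snd := by
  simp only [mixedOf, List.mem_flatMap, List.mem_map]
  constructor
  · rintro ⟨kv, hkv, h⟩
    simp only [List.mem_cons, List.not_mem_nil, or_false] at h
    rcases h with h | h
    · exact MixItem.noConfusion h
    · refine ⟨kv, hkv, ?_⟩
      injection h with h1 h2
      exact h1.symm
  · rintro ⟨kv, hkv, h⟩
    refine ⟨kv, hkv, ?_⟩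
    exact List.mem_cons.mpr (Or.inr (List.mem_cons.mpr (Or.inl (by rw [h]))))

theorem stepA_loop (buf : List (String × Int)) :
    ∀ (l : List (String × Int)) (kept : List (String × Int)) (acc : List (String × List Int)),
    (∀ p ∈ l, p.1 ∉ kept.map Prod.fst) → (l.map Prod.fst).Nodup →
    l.foldl (fun (st : List (String × List Int) × List MixItem) p =>
        if MixItem.key p.1 ∈ st.2 ∨ MixItem.val p.2 (cntV buf p.2) ∈ st.2 then st
        else (st.1 ++ [(p.1, [p.2, cntV buf p.2])],
              st.2 ++ [MixItem.key p.1, MixItem.val p.2 (cntV buf p.2)]))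
      (acc, mixedOf buf kept)
    = (acc ++ (foVals l (kept.map Prod.snd)).map (fOut buf),
       mixedOf buf (kept ++ foVals l (kept.map Prod.snd))) := by
  intro l
  induction l with
  | nil =>
    intro kept acc _ _
    simp [foVals]
  | cons p t ih =>
    intro kept acc hk hnd
    simp only [List.map_cons, List.nodup_cons] at hnd
    simp only [List.foldl_cons]
    by_cases hv : p.2 ∈ kept.map Prod.snd
    · have hcond : MixItem.key p.1 ∈ (acc, mixedOf buf kept).2
          ∨ MixItem.val p.2 (cntV buf p.2) ∈ (acc, mixedOf buf kept).2 :=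
        Or.inr ((mixedOf_val_mem buf kept p.2).mpr hv)
      rw [if_pos hcond]
      rw [ih kept acc (fun q hq => hk q (List.mem_cons_of_mem p hq)) hnd.2]
      have hfo : foVals (p :: t) (kept.map Prod.snd) = foVals t (kept.map Prod.snd) := by
        simp only [foVals, if_pos hv]
      rw [hfo]
    · have hcond : ¬ (MixItem.key p.1 ∈ (acc, mixedOf buf kept).2
          ∨ MixItem.val p.2 (cntV buf p.2) ∈ (acc, mixedOf buf kept).2) := by
        show ¬ (MixItem.key p.1 ∈ mixedOf buf kept
          ∨ MixItem.val p.2 (cntV buf p.2) ∈ mixedOf buf kept)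
        rw [mixedOf_key_mem, mixedOf_val_mem]
        push_neg
        exact ⟨hk p (by simp), hv⟩
      rw [if_neg hcond]
      have hmix : mixedOf buf kept ++ [MixItem.key p.1, MixItem.val p.2 (cntV buf p.2)]
          = mixedOf buf (kept ++ [p]) := by
        simp [mixedOf]
      have hk' : ∀ q ∈ t, q.1 ∉ (kept ++ [p]).map Prod.fst := by
        intro q hq
        simp only [List.map_append, List.mem_append, List.map_cons, List.map_nil,
          List.mem_cons, List.not_mem_nil, or_false, not_or]
        exact ⟨hk q (List.mem_cons_of_mem p hq),
          fun hh => hnd.1 (hh ▸ (List.mem_map.mpr ⟨q, hq, rfl⟩))⟩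
      have hstep : ((acc, mixedOf buf kept).1 ++ [(p.1, [p.2, cntV buf p.2])],
            (acc, mixedOf buf kept).2 ++ [MixItem.key p.1, MixItem.val p.2 (cntV buf p.2)])
          = (acc ++ [(p.1, [p.2, cntV buf p.2])], mixedOf buf (kept ++ [p])) := by
        rw [← hmix]
      rw [hstep, ih (kept ++ [p]) (acc ++ [(p.1, [p.2, cntV buf p.2])]) hk' hnd.2]
      have hfo : foVals (p :: t) (kept.map Prod.snd)
          = p :: foVals t (kept.map Prod.snd ++ [p.2]) := by
        simp only [foVals, if_neg hv]
      rw [hfo]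
      simp [fOut, List.map_append, List.append_assoc]

-- ===== VERDICT (by name: the statement is the Claim_ definition above) =====
theorem CorrectDict_spec : Claim_equal_CorrectDict := by
  intro buf _ hpre
  unfold Spec_CorrectDict CorrectDict CorrectDict_alt
  have hnd : (buf.map Prod.fst).Nodup := hpre
  have hkeys : (PySem.Dict.mk buf).keys = buf.map Prod.fst := rfl
  have hitems : (PySem.Dict.mk buf).items = buf := rfl
  simp only [hkeys, hitems]
  rw [groups_char buf]
  have hA : (buf.map Prod.fst).foldl
      (fun (st : List (String × List Int) × List MixItem) key =>
        let liv := ((buf.map Prod.fst).foldl (fun ld key_b =>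
            ld.insert key_b ((PySem.Dict.mk buf).getD key_b 0,
              (buf.map Prod.fst).foldl (fun cnt key' =>
                if (PySem.Dict.mk buf).getD key_b 0 = (PySem.Dict.mk buf).getD key' 0
                then cnt + 1 else cnt) 0)) PySem.Dict.empty).getD key (0, 0)
        if MixItem.key key ∈ st.2 ∨ MixItem.val liv.1 liv.2 ∈ st.2 then st
        else (st.1 ++ [(key, [liv.1, liv.2])],
              st.2 ++ [MixItem.key key, MixItem.val liv.1 liv.2])) ([], [])
      = buf.foldl (fun (st : List (String × List Int) × List MixItem) p =>
        if MixItem.key p.1 ∈ st.2 ∨ MixItem.val p.2 (cntV buf p.2) ∈ st.2 then st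
        else (st.1 ++ [(p.1, [p.2, cntV buf p.2])],
              st.2 ++ [MixItem.key p.1, MixItem.val p.2 (cntV buf p.2)])) ([], []) := by
    rw [List.foldl_map]
    apply PySem.List.foldl_congr_mem
    intro st p hp
    have hliv : ((buf.map Prod.fst).foldl (fun ld key_b =>
        ld.insert key_b ((PySem.Dict.mk buf).getD key_b 0,
          (buf.map Prod.fst).foldl (fun cnt key' =>
            if (PySem.Dict.mk buf).getD key_b 0 = (PySem.Dict.mk buf).getD key' 0
            then cnt + 1 else cnt) 0)) PySem.Dict.empty).getD p.1 (0, 0)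
        = (p.2, cntV buf p.2) := by
      rw [listInDict_getD buf hnd _ p hp, Prod.mk.injEq]
      exact ⟨getD_mk_of_mem buf hnd p hp, cntFold_eq buf hnd p hp⟩
    simp only [hliv]
  rw [hA]
  have hloop := stepA_loop buf buf [] [] (by simp) hnd
  simp only [mixedOf, List.flatMap_nil, List.map_nil, List.nil_append] at hloop
  rw [hloop]
  rw [List.map_map]
  apply List.map_congr_left
  intro kv _
  rfl
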